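-- pv_equiv track=rewrite | github.com/mpolatcan/kubehawk | kubeagle/controllers/team/parsers/team_parser.py | group_charts_by_team
-- ===== SOURCE A (Python) =====
-- from typing import Any
--
-- def group_charts_by_team(
--     charts: list[dict[str, Any]]
-- ) -> dict[str, list[dict[str, Any]]]:
--     """Group charts by team name.
--
--     Args:
--         charts: List of chart dictionaries
--
--     Returns:
--         Dictionary mapping team name to list of charts.
--     """
--     by_team: dict[str, list[dict[str, Any]]] = {}
--     for chart in charts:
--         team = chart.get("team", "Unknown")
--         if team not in by_team:
--             by_team[team] = []
--         by_team[team].append(chart)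
--     return by_team
-- ===== SOURCE B (Python) =====
-- def group_charts_by_team(charts):
--     """Group charts by team name via iterative partition: each round takes the
--     first pending chart's team, emits that whole group at once, and keeps only
--     the other teams' charts as the new worklist."""
--     result = {}
--     pending = charts
--     while pending:
--         head, rest = pending[0], pending[1:]
--         t = head.get("team", "Unknown")
--         result[t] = [head] + [c for c in rest if c.get("team", "Unknown") == t]
--         pending = [c for c in rest if c.get("team", "Unknown") != t]
--     return result
-- ===== Notes on version B (the rewrite author's own statement) =====
-- stated objective: alternative
-- what changed: Replaces A's single pass that grows per-team lists inside a dict with an iterative partition over a shrinking worklist: each round emits the first pending chart's entire team group at once and keeps only the remaining teams' charts.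
import Mathlib
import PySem

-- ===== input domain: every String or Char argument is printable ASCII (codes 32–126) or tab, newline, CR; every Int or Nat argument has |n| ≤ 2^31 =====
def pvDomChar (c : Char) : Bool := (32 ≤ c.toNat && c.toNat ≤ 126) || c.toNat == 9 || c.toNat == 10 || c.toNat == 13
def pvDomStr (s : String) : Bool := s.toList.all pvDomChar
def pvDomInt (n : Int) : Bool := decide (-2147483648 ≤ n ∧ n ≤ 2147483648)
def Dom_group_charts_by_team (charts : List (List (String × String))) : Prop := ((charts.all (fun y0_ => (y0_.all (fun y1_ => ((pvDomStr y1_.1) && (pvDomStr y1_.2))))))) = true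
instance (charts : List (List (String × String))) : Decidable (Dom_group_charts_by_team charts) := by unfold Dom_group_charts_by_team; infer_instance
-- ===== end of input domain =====

-- B groups by iterative partition over a shrinking worklist (each round emits one whole
-- team group and drops it from the worklist), instead of A's single pass growing per-team
-- lists inside a dict; same result, alternative decomposition (no speed claim).

-- ===== PORT A =====
-- chart.get("team", "Unknown")
def pvTeamA (chart : List (String × String)) : String :=
  (PySem.Dict.mk chart).getD "team" "Unknown"

def group_charts_by_team (charts : List (List (String × String))) : List (String × List (List (String × String))) :=
  (charts.foldl
    (fun by_team chart =>
      let team := pvTeamA chart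
      let by_team := if by_team.contains team then by_team else by_team.insert team []
      by_team.modify team [] (fun l => l ++ [chart]))
    PySem.Dict.empty).items

-- ===== PORT B =====
-- chart.get("team", "Unknown")
def pvTeamB (chart : List (String × String)) : String :=
  (PySem.Dict.mk chart).getD "team" "Unknown"

-- the while loop of Source B: 'result' is the dict under the association-list convention;
-- 'result[t] = …' always binds a FRESH key (t was removed from the worklist when first
-- seen), so the dict assignment is exactly an append to the association list.
def groupLoop (pending : List (List (String × String))) (result : List (String × List (List (String × String)))) : List (String × List (List (String × String))) :=
  match pending with
  | [] => result
  | head :: rest =>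
    let t := pvTeamB head
    groupLoop (rest.filter (fun c => !(pvTeamB c == t)))
      (result ++ [(t, head :: rest.filter (fun c => pvTeamB c == t))])
termination_by pending.length
decreasing_by
  have h := List.length_filter_le (fun x : {c // c ∈ rest} => !(pvTeamB x.1 == pvTeamB head)) rest.attach
  simp at h ⊢
  omega

def group_charts_by_team_alt (charts : List (List (String × String))) : List (String × List (List (String × String))) :=
  groupLoop charts []

-- ===== PRECONDITION & SPEC =====
def Spec_group_charts_by_team (charts : List (List (String × String))) (out : List (String × List (List (String × String)))) : Prop := out = group_charts_by_team_alt charts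
instance (charts : List (List (String × String))) (out : List (String × List (List (String × String)))) : Decidable (Spec_group_charts_by_team charts out) := by unfold Spec_group_charts_by_team; infer_instance

-- ===== CLAIM (what is proved, stated in full; the proofs are below) =====
def Claim_equal_group_charts_by_team : Prop := ∀ (charts : List (List (String × String))), Dom_group_charts_by_team charts → Spec_group_charts_by_team charts (group_charts_by_team charts)

-- ===== LEMMAS AND PROOFS =====

-- the common characterisation both ports are reduced to:
-- the deduped team keys in first-occurrence order, each paired with its filtered group
def specGroup (charts : List (List (String × String))) : List (String × List (List (String × String))) :=
  (PySem.Set.ofList (charts.map pvTeamB)).map (fun t => (t, charts.filter (fun c => pvTeamB c == t)))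

-- ---- A-side: A's fold over the dict equals specGroup ----

-- A's loop body ('if team not in d: d[team] = []' then append) is one dict 'modify' with default []
theorem stepA_eq_modify (d : PySem.Dict String (List (List (String × String)))) (chart : List (String × String)) :
    (let team := pvTeamA chart
     let by_team := if d.contains team then d else d.insert team []
     by_team.modify team [] (fun l => l ++ [chart]))
    = d.modify (pvTeamA chart) [] (fun l => l ++ [chart]) := by
  by_cases h : d.contains (pvTeamA chart) = true
  · simp only [h, if_true]
  · have hf : d.contains (pvTeamA chart) = false := by simpa using h
    simp only [hf, Bool.false_eq_true, if_false]
    rw [PySem.Dict.modify, PySem.Dict.modify, PySem.Dict.getD_insert_self,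
        PySem.Dict.insert_insert_self, PySem.Dict.getD_of_not_contains _ _ hf]

theorem groupA_eq_spec (charts : List (List (String × String))) :
    group_charts_by_team charts = specGroup charts := by
  unfold group_charts_by_team specGroup
  have hT : pvTeamB = pvTeamA := rfl
  simp only [hT]
  have hfun : (fun (by_team : PySem.Dict String (List (List (String × String)))) chart =>
      let team := pvTeamA chart
      let by_team := if by_team.contains team then by_team else by_team.insert team []
      by_team.modify team [] (fun l => l ++ [chart]))
      = fun d chart => d.modify (pvTeamA chart) [] (fun l => l ++ [chart]) := by
    funext d chart
    exact stepA_eq_modify d chart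
  rw [hfun]
  have hpair : charts.foldl (fun d chart => d.modify (pvTeamA chart) [] (fun l => l ++ [chart])) PySem.Dict.empty
      = (charts.map (fun c => (pvTeamA c, c))).foldl (fun d p => d.modify p.1 [] (fun l => l ++ [p.2])) PySem.Dict.empty := by
    rw [List.foldl_map]
  have hnd : (charts.foldl (fun d chart => d.modify (pvTeamA chart) [] (fun l => l ++ [chart])) PySem.Dict.empty).keys.Nodup := by
    exact PySem.Dict.nodup_keys_foldl_modify_key charts pvTeamA []
      (fun _ chart => fun l => l ++ [chart]) PySem.Dict.empty (by simp)
  have hkeys : (charts.foldl (fun d chart => d.modify (pvTeamA chart) [] (fun l => l ++ [chart])) PySem.Dict.empty).keys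
      = PySem.Set.ofList (charts.map pvTeamA) := by
    rw [PySem.Dict.keys_foldl_modify_key charts pvTeamA [] (fun _ chart => fun l => l ++ [chart]) PySem.Dict.empty]
    simp [PySem.Set.update_nil_left]
  have hgetD : ∀ t, (charts.foldl (fun d chart => d.modify (pvTeamA chart) [] (fun l => l ++ [chart])) PySem.Dict.empty).getD t []
      = charts.filter (fun c => pvTeamA c == t) := by
    intro t
    rw [hpair, PySem.Dict.getD_foldl_modify_append, PySem.Dict.getD_empty]
    rw [List.filter_map]
    simp [List.map_map, Function.comp_def]
  rw [PySem.Dict.items_eq_map_keys _ hnd [], hkeys]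
  refine List.map_congr_left ?_
  intro t _
  rw [hgetD t]

-- ---- B-side: the partition loop equals specGroup ----

-- folding Set.add from a set already containing t ignores the occurrences of t
theorem foldl_add_filter {α : Type} [BEq α] [LawfulBEq α] (t : α) :
    ∀ (l : List α) (s : List α), t ∈ s →
      l.foldl PySem.Set.add s = (l.filter (fun x => !(x == t))).foldl PySem.Set.add s := by
  intro l
  induction l with
  | nil => intro s _; rfl
  | cons x l ih =>
    intro s hs
    by_cases hx : x = t
    · subst hx
      have hc : PySem.Set.add s x = s := by
        simp [PySem.Set.add, PySem.Set.contains, hs]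
      simp only [List.filter_cons, beq_self_eq_true, Bool.not_true, Bool.false_eq_true, if_false,
        List.foldl_cons, hc]
      exact ih s hs
    · have hb : (!(x == t)) = true := by simp [hx]
      simp only [List.filter_cons, hb, if_true, List.foldl_cons]
      exact ih (PySem.Set.add s x) (by simp [PySem.Set.mem_add, hs])

-- folding Set.add over a list avoiding t keeps a leading t in place
theorem foldl_add_cons {α : Type} [BEq α] [LawfulBEq α] (t : α) :
    ∀ (l : List α) (s : List α), t ∉ l →
      l.foldl PySem.Set.add (t :: s) = t :: l.foldl PySem.Set.add s := by
  intro l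
  induction l with
  | nil => intro s _; rfl
  | cons x l ih =>
    intro s hnl
    have hxt : x ≠ t := fun h => hnl (h ▸ List.mem_cons_self)
    have hstep : PySem.Set.add (t :: s) x = t :: PySem.Set.add s x := by
      by_cases hm : x ∈ s
      · simp [PySem.Set.add, PySem.Set.contains, hm]
      · simp [PySem.Set.add, PySem.Set.contains, hm, hxt]
    simp only [List.foldl_cons, hstep]
    exact ih (PySem.Set.add s x) (fun h => hnl (List.mem_cons_of_mem _ h))

theorem ofList_cons_filter {α : Type} [BEq α] [LawfulBEq α] (t : α) (l : List α) :
    PySem.Set.ofList (t :: l) = t :: PySem.Set.ofList (l.filter (fun x => !(x == t))) := by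
  have h0 : PySem.Set.ofList (t :: l) = l.foldl PySem.Set.add [t] := by
    simp [PySem.Set.ofList_eq_foldl, PySem.Set.add, PySem.Set.contains]
  rw [h0, foldl_add_filter t l [t] (List.mem_singleton.mpr rfl)]
  rw [foldl_add_cons t _ _ (by simp [List.mem_filter])]
  rw [PySem.Set.ofList_eq_foldl]

theorem groupLoop_eq_spec : ∀ (n : ℕ) (pending : List (List (String × String))),
    pending.length ≤ n → ∀ res, groupLoop pending res = res ++ specGroup pending := by
  intro n
  induction n with
  | zero =>
    intro pending hlen res
    have : pending = [] := List.eq_nil_of_length_eq_zero (Nat.le_zero.mp hlen)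
    subst this
    rw [groupLoop.eq_def]
    simp [specGroup, PySem.Set.ofList]
  | succ n ih =>
    intro pending hlen res
    match pending with
    | [] =>
      rw [groupLoop.eq_def]
      simp [specGroup, PySem.Set.ofList]
    | head :: rest =>
      have ht : pvTeamB head = pvTeamB head := rfl
      have hstep : groupLoop (head :: rest) res
          = groupLoop (rest.filter (fun c => !(pvTeamB c == pvTeamB head)))
              (res ++ [(pvTeamB head, head :: rest.filter (fun c => pvTeamB c == pvTeamB head))]) := by
        rw [groupLoop.eq_def]
      rw [hstep]
      set t := pvTeamB head with ht
      have hlen' : (rest.filter (fun c => !(pvTeamB c == t))).length ≤ n :=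
        le_trans (List.length_filter_le _ rest) (Nat.le_of_succ_le_succ hlen)
      rw [ih _ hlen' _, List.append_assoc]
      congr 1
      -- specGroup (head :: rest) = (t, head :: same) :: specGroup others
      unfold specGroup
      have hmap : (rest.filter (fun c => !(pvTeamB c == t))).map pvTeamB
          = (rest.map pvTeamB).filter (fun x => !(x == t)) := by
        rw [List.filter_map]; rfl
      have hkeys : PySem.Set.ofList ((head :: rest).map pvTeamB)
          = t :: PySem.Set.ofList ((rest.filter (fun c => !(pvTeamB c == t))).map pvTeamB) := by
        rw [List.map_cons, ← ht, ofList_cons_filter, hmap]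
      rw [hkeys, List.map_cons, List.singleton_append]
      congr 1
      · -- head's own group
        simp [ht]
      · -- the remaining teams' groups are unchanged by dropping team-t charts
        refine List.map_congr_left ?_
        intro t' hmem
        have ht' : t' ≠ t := by
          rcases (PySem.Set.mem_ofList _ t').mp hmem with h
          rcases List.mem_map.mp h with ⟨c, hc, hct⟩
          have := (List.mem_filter.mp hc).2
          intro he; subst he; rw [hct] at this; simp at this
        have hhead : (pvTeamB head == t') = false := by
          simp [← ht, Ne.symm ht']
        rw [List.filter_cons, hhead]
        simp only [Bool.false_eq_true, if_false]
        rw [List.filter_filter]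
        refine congrArg _ (List.filter_congr ?_)
        intro c _
        by_cases hc : pvTeamB c = t' <;> simp [hc, ht']

-- ===== VERDICT (by name: the statement is the Claim_ definition above) =====
theorem group_charts_by_team_spec : Claim_equal_group_charts_by_team := by
  intro charts _
  unfold Spec_group_charts_by_team group_charts_by_team_alt
  rw [groupA_eq_spec, groupLoop_eq_spec charts.length charts le_rfl []]
  simp
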